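-- pv_equiv track=rewrite | github.com/ChangjinZhang/newlantern-submission | app.py | detect_group
-- ===== SOURCE A (Python) =====
-- def detect_group(text, groups):
--     hits = set()
--     low = f" {text.lower()} "
--     for group, words in groups.items():
--         for w in words:
--             if w.lower() in low:
--                 hits.add(group)
--                 break
--     return hits
-- ===== SOURCE B (Python) =====
-- def detect_group(text, groups):
--     low = f" {text.lower()} "
--     # phase 1: distinct lowered words across all groups
--     vocab = {w.lower() for words in groups.values() for w in words}
--     # phase 2: one substring test per distinct word
--     present = {w for w in vocab if w in low}
--     # phase 3: a group hits iff one of its words is present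
--     return {g for g, words in groups.items() if any(w.lower() in present for w in words)}
-- ===== Notes on version B (the rewrite author's own statement) =====
-- stated objective: alternative
-- what changed: A's nested per-group loop with break and incremental set is replaced by a three-phase pipeline: build the set of distinct lowered words, test each distinct word against the padded text once, then filter the groups by membership of a lowered word in that matched set.
import Mathlib
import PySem

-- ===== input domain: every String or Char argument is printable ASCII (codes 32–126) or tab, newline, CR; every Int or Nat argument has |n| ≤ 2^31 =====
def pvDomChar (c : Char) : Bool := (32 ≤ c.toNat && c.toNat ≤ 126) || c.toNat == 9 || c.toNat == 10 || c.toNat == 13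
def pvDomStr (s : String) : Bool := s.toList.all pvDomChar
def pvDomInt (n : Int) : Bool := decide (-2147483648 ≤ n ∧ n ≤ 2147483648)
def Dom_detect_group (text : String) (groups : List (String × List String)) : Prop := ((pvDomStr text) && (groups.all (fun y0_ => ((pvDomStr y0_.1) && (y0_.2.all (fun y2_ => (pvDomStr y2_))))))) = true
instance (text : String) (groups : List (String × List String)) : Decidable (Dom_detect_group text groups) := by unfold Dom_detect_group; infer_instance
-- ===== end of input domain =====

-- B replaces A's per-group nested substring loop by a two-phase form: dedup the lowered
-- words, test each distinct word against the text once, then filter the groups; same result.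
-- ===== PORT A =====
-- inner 'for w in words: if w.lower() in low: hits.add(group); break'
def dgInner (low : String) (hits : List String) (group : String) : List String → List String
  | [] => hits
  | w :: rest =>
      if PySem.Str.isIn (PySem.Str.lower w) low then PySem.Set.add hits group
      else dgInner low hits group rest

def detect_group (text : String) (groups : List (String × List String)) : List String :=
  let low := " " ++ PySem.Str.lower text ++ " "
  groups.foldl (fun hits p => dgInner low hits p.1 p.2) PySem.Set.empty

-- ===== PORT B =====
def detect_group_alt (text : String) (groups : List (String × List String)) : List String :=
  let low := " " ++ PySem.Str.lower text ++ " "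
  let vocab := PySem.Set.ofList (groups.flatMap (fun p => p.2.map (fun w => PySem.Str.lower w)))
  let present := PySem.Set.ofList (vocab.filter (fun v => PySem.Str.isIn v low))
  PySem.Set.ofList
    ((groups.filter (fun p => p.2.any (fun w => PySem.Set.contains present (PySem.Str.lower w)))).map Prod.fst)

-- ===== PRECONDITION & SPEC =====
def Spec_detect_group (text : String) (groups : List (String × List String)) (out : List String) : Prop := out = detect_group_alt text groups
instance (text : String) (groups : List (String × List String)) (out : List String) : Decidable (Spec_detect_group text groups out) := by unfold Spec_detect_group; infer_instance

-- ===== CLAIM (what is proved, stated in full; the proofs are below) =====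
def Claim_equal_detect_group : Prop := ∀ (text : String) (groups : List (String × List String)), Dom_detect_group text groups → Spec_detect_group text groups (detect_group text groups)

-- ===== LEMMAS AND PROOFS =====

-- A's inner loop with break computes an 'if any … then add else skip'
theorem dgInner_eq (low : String) (hits : List String) (g : String) (ws : List String) :
    dgInner low hits g ws =
      if ws.any (fun w => PySem.Str.isIn (PySem.Str.lower w) low) then PySem.Set.add hits g
      else hits := by
  induction ws with
  | nil => simp [dgInner]
  | cons w rest ih =>
      cases h : PySem.Str.isIn (PySem.Str.lower w) low <;>
        simp only [dgInner, h, List.any_cons, Bool.false_or, Bool.true_or, Bool.false_eq_true,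
          reduceIte, ih]

-- A's outer loop, with the inner loop replaced by its characterisation
theorem fold_dgInner_eq (low : String) (groups : List (String × List String))
    (h0 : List String) :
    groups.foldl (fun hits p => dgInner low hits p.1 p.2) h0 =
      groups.foldl
        (fun hits p =>
          if p.2.any (fun w => PySem.Str.isIn (PySem.Str.lower w) low) then PySem.Set.add hits p.1
          else hits) h0 := by
  induction groups generalizing h0 with
  | nil => rfl
  | cons p rest ih => rw [List.foldl_cons, List.foldl_cons, dgInner_eq, ih]

-- folding 'add on condition' over a list is ofList of the filtered first components
theorem foldl_add_if (c : String × List String → Bool) (groups : List (String × List String))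
    (h0 : List String) :
    groups.foldl (fun hits p => if c p then PySem.Set.add hits p.1 else hits) h0 =
      ((groups.filter c).map Prod.fst).foldl PySem.Set.add h0 := by
  induction groups generalizing h0 with
  | nil => rfl
  | cons p rest ih =>
      by_cases h : c p
      · simp [h, ih]
      · simp [h, ih]

theorem any_congr_mem {α : Type} (l : List α) (f g : α → Bool) (h : ∀ a ∈ l, f a = g a) :
    l.any f = l.any g := by
  induction l with
  | nil => rfl
  | cons a t ih =>
      simp only [List.any_cons, h a (List.mem_cons_self), ih fun b hb => h b (List.mem_cons_of_mem a hb)]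

-- inside B, 'lower w ∈ present' decides exactly 'lower w in low' for every word of the groups
theorem contains_present (low : String) (groups : List (String × List String))
    (p : String × List String) (hp : p ∈ groups) (w : String) (hw : w ∈ p.2) :
    PySem.Set.contains
      (PySem.Set.ofList
        ((PySem.Set.ofList (groups.flatMap (fun q => q.2.map (fun v => PySem.Str.lower v)))).filter
          (fun v => PySem.Str.isIn v low)))
      (PySem.Str.lower w) = PySem.Str.isIn (PySem.Str.lower w) low := by
  have hv : PySem.Str.lower w ∈
      PySem.Set.ofList (groups.flatMap (fun q => q.2.map (fun v => PySem.Str.lower v))) :=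
    (PySem.Set.mem_ofList _ _).2 (List.mem_flatMap.2 ⟨p, hp, List.mem_map.2 ⟨w, hw, rfl⟩⟩)
  have key : PySem.Set.contains
      (PySem.Set.ofList
        ((PySem.Set.ofList (groups.flatMap (fun q => q.2.map (fun v => PySem.Str.lower v)))).filter
          (fun v => PySem.Str.isIn v low)))
      (PySem.Str.lower w) = true ↔ PySem.Str.isIn (PySem.Str.lower w) low = true := by
    rw [PySem.Set.contains_iff, PySem.Set.mem_ofList, List.mem_filter]
    exact ⟨fun h => h.2, fun h => ⟨hv, h⟩⟩
  cases h1 : PySem.Str.isIn (PySem.Str.lower w) low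
  · cases h2 : PySem.Set.contains
        (PySem.Set.ofList
          ((PySem.Set.ofList (groups.flatMap (fun q => q.2.map (fun v => PySem.Str.lower v)))).filter
            (fun v => PySem.Str.isIn v low)))
        (PySem.Str.lower w)
    · rfl
    · exact (h1 ▸ key.1 h2).symm
  · exact key.2 h1

-- ===== VERDICT (by name: the statement is the Claim_ definition above) =====
theorem detect_group_spec : Claim_equal_detect_group := by
  intro text groups _
  unfold Spec_detect_group
  show detect_group text groups = detect_group_alt text groups
  simp only [detect_group, detect_group_alt]
  rw [fold_dgInner_eq]
  rw [List.filter_congr (fun p hp =>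
    any_congr_mem p.2 _ _ (fun w hw => contains_present _ groups p hp w hw))]
  rw [foldl_add_if, PySem.Set.ofList_eq_foldl]
  rfl
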